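-- pv_equiv track=rewrite | github.com/awwalm/DSAlgoPy | Goodrich/Chapter10/Exercises/Utility/soe.py | naive_sieve
-- ===== SOURCE A (Python) =====
-- def naive_sieve(m: int):
--     """Naive implementation of the Sieve of Eratosthenes algorithm for finding primes in range [m > 0, 2*m).\n
--     :param m : Initial length specified.
--     """
--     BA = [True] * m
--     for i, k in zip(range(m + 1, 2 * m + 1), range(len(BA))):
--         if i > 3:
--             for j in range(2, i):
--                 if i % j == 0:
--                     BA[k] = False
--                     break
--     return BA
-- ===== SOURCE B (Python) =====
-- def naive_sieve(m: int):
--     """Primality flags for the integers m+1 .. 2*m, by trial division up to sqrt."""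
--     def is_prime(n):
--         if n < 4:
--             return n > 1
--         if n % 2 == 0:
--             return False
--         d = 3
--         while d * d <= n:
--             if n % d == 0:
--                 return False
--             d += 2
--         return True
--     return [is_prime(i) for i in range(m + 1, 2 * m + 1)]
-- ===== Notes on version B (the rewrite author's own statement) =====
-- stated objective: faster
-- what changed: Replaces the per-number full trial division over all j in [2,i) writing into a preallocated flag list with a direct comprehension testing each candidate only by odd divisors up to sqrt(i).
import Mathlib
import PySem

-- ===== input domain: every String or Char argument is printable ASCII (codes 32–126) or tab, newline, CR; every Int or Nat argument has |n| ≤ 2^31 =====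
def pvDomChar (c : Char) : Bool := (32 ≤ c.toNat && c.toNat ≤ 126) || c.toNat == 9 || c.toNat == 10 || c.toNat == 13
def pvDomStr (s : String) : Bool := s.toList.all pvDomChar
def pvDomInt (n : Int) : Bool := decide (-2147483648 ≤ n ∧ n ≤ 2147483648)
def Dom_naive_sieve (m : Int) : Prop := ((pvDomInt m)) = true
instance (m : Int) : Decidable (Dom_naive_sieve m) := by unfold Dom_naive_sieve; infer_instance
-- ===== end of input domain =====

-- B replaces A's full trial division over all j in [2,i) into a preallocated flag list
-- by a comprehension testing each candidate only by odd divisors up to sqrt(i) (objective: faster).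

-- ===== PORT A =====
-- BA = [True]*m; for i,k in zip(range(m+1,2m+1), range(len(BA))): if i>3: inner loop
-- sets BA[k]=False and breaks on the first j in [2,i) dividing i (the break-out loop is `any`).
def naive_sieve (m : Int) : List Bool :=
  let BA := List.replicate m.toNat true
  (List.zip (PySem.List.pyRange (m + 1) (2 * m + 1) 1)
            (PySem.List.pyRange 0 ((BA.length : Int)) 1)).foldl
    (fun BA ik =>
      if ik.1 > 3 then
        if (PySem.List.pyRange 2 ik.1 1).any (fun j => PySem.Int.mod ik.1 j == 0) then
          BA.set ik.2.toNat false
        else BA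
      else BA) BA

-- ===== PORT B =====
-- the `while d*d <= n: … d += 2` loop of Source B's is_prime
def trialOdd (n : Int) (d : Nat) : Bool :=
  if _h : (d : Int) * (d : Int) ≤ n then
    if PySem.Int.mod n (d : Int) == 0 then false else trialOdd n (d + 2)
  else true
termination_by n.toNat + 1 - d
decreasing_by
  have hd : (d : Int) ≤ (d : Int) * (d : Int) := by nlinarith [Int.natCast_nonneg d]
  have : (d : Int) ≤ n := le_trans hd _h
  omega

def isPrimeAlt (n : Int) : Bool :=
  if n < 4 then decide (n > 1)
  else if PySem.Int.mod n 2 == 0 then false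
  else trialOdd n 3

def naive_sieve_alt (m : Int) : List Bool :=
  (PySem.List.pyRange (m + 1) (2 * m + 1) 1).map isPrimeAlt

-- ===== PRECONDITION & SPEC =====
def Spec_naive_sieve (m : Int) (out : List Bool) : Prop := out = naive_sieve_alt m
instance (m : Int) (out : List Bool) : Decidable (Spec_naive_sieve m out) := by unfold Spec_naive_sieve; infer_instance

-- ===== CLAIM (what is proved, stated in full; the proofs are below) =====
def Claim_equal_naive_sieve : Prop := ∀ (m : Int), Dom_naive_sieve m → Spec_naive_sieve m (naive_sieve m)

-- ===== LEMMAS AND PROOFS =====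

-- the per-candidate value A's loop leaves at position k (candidate i)
def gA (i : Int) : Bool :=
  if i > 3 then !((PySem.List.pyRange 2 i 1).any (fun j => PySem.Int.mod i j == 0)) else true

-- a fold that conditionally clears position k, over consecutive indices, realises `map`
lemma fold_set (g : Nat → Bool) : ∀ (n j : Nat),
    List.foldl (fun BA k => if g k then BA else BA.set k false)
      ((List.range j).map g ++ List.replicate n true) (List.range' j n)
    = (List.range (j + n)).map g := by
  intro n
  induction n with
  | zero => intro j; simp
  | succ n ih =>
    intro j
    have hstep :
        (if g j then ((List.range j).map g ++ List.replicate (n+1) true)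
         else ((List.range j).map g ++ List.replicate (n+1) true).set j false)
        = (List.range (j+1)).map g ++ List.replicate n true := by
      have hlen : ((List.range j).map g).length = j := by simp
      rcases h : g j with _ | _
      · simp only [if_neg Bool.false_ne_true]
        rw [List.set_append_right _ _ (by omega)]
        simp [List.range_succ, List.replicate_succ, hlen, h]
      · simp [h, List.range_succ, List.replicate_succ]
    calc List.foldl (fun BA k => if g k then BA else BA.set k false)
          ((List.range j).map g ++ List.replicate (n+1) true) (List.range' j (n+1))
        = List.foldl (fun BA k => if g k then BA else BA.set k false)
          ((List.range (j+1)).map g ++ List.replicate n true) (List.range' (j+1) n) := by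
          rw [List.range'_succ, List.foldl_cons, hstep]
      _ = (List.range (j + 1 + n)).map g := ih (j+1)
      _ = (List.range (j + (n+1))).map g := by ring_nf

lemma naive_sieve_eq_map (m : Int) :
    naive_sieve m = (List.range m.toNat).map (fun k : Nat => gA (m + 1 + (k : Int))) := by
  show (List.zip (PySem.List.pyRange (m + 1) (2 * m + 1) 1)
            (PySem.List.pyRange 0 (((List.replicate m.toNat true).length : Int)) 1)).foldl
    _ (List.replicate m.toNat true) = _
  rw [List.length_replicate]
  rw [PySem.List.pyRange_one (m+1) (2*m+1), PySem.List.pyRange_one 0 (m.toNat : Int)]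
  have h1 : (2 * m + 1 - (m + 1)).toNat = m.toNat := by omega
  have h2 : ((m.toNat : Int) - 0).toNat = m.toNat := by omega
  rw [h1, h2, List.zip_map', List.foldl_map]
  have hfun : (fun (BA : List Bool) (k : Nat) =>
      (fun BA (ik : Int × Int) =>
        if ik.1 > 3 then
          if (PySem.List.pyRange 2 ik.1 1).any (fun j => PySem.Int.mod ik.1 j == 0) then
            BA.set ik.2.toNat false
          else BA
        else BA) BA ((fun k : Nat => m + 1 + (k : Int)) k, (fun k : Nat => (0 : Int) + (k : Int)) k))
      = (fun (BA : List Bool) (k : Nat) => if gA (m + 1 + (k : Int)) then BA else BA.set k false) := by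
    funext BA k
    simp only [gA]
    by_cases h3 : m + 1 + (k : Int) > 3
    · simp only [if_pos h3]
      rcases h : (PySem.List.pyRange 2 (m + 1 + (k:Int)) 1).any
          (fun j => PySem.Int.mod (m + 1 + (k:Int)) j == 0) with _ | _ <;>
        simp [Int.toNat_natCast]
    · simp [h3]
  rw [hfun]
  have h := fold_set (fun k => gA (m + 1 + (k : Int))) m.toNat 0
  simp only [List.range_zero, List.map_nil, List.nil_append, Nat.zero_add] at h
  rw [← List.range_eq_range'] at h
  exact h

lemma naive_sieve_alt_eq_map (m : Int) :
    naive_sieve_alt m = (List.range m.toNat).map (fun k : Nat => isPrimeAlt (m + 1 + (k : Int))) := by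
  unfold naive_sieve_alt
  rw [PySem.List.pyRange_one]
  have h1 : (2 * m + 1 - (m + 1)).toNat = m.toNat := by omega
  rw [h1, List.map_map]
  simp only [Function.comp_def]

-- characterisation of the B-side while loop
lemma trialOdd_iff (n : Int) (d : Nat) :
    trialOdd n d = true ↔
      ∀ e : Nat, d ≤ e → (e - d) % 2 = 0 → (e : Int) * (e : Int) ≤ n → ¬ ((e : Int) ∣ n) := by
  induction d using trialOdd.induct n with
  | case1 d hle hdvd =>
    rw [trialOdd, dif_pos hle, if_pos hdvd]
    refine iff_of_false (by simp) fun hall => ?_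
    have hd0 : PySem.Int.mod n (d : Int) = 0 := by simpa using hdvd
    have hd : (d : Int) ∣ n := (PySem.Int.mod_eq_zero_iff_dvd n _).mp hd0
    exact hall d le_rfl (by omega) hle hd
  | case2 d hle hdvd ih =>
    rw [trialOdd, dif_pos hle, if_neg hdvd]
    rw [ih]
    constructor
    · intro hall e he hpar hsq
      by_cases hed : e = d
      · subst hed
        intro hdd
        exact hdvd (by simpa using (PySem.Int.mod_eq_zero_iff_dvd n _).mpr hdd)
      · exact hall e (by omega) (by omega) hsq
    · intro hall e he hpar hsq
      exact hall e (by omega) (by omega) hsq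
  | case3 d hle =>
    rw [trialOdd, dif_neg hle]
    refine iff_of_true rfl fun e he _ hsq => ?_
    exfalso
    have hde : (d : Int) ≤ (e : Int) := by exact_mod_cast he
    have : (d : Int) * (d : Int) ≤ (e : Int) * (e : Int) :=
      mul_le_mul hde hde (Int.natCast_nonneg d) (le_trans (Int.natCast_nonneg d) hde)
    omega

-- A's inner loop decides compositeness for i ≥ 4
lemma any_iff_not_prime (n : Int) (hn : 4 ≤ n) :
    ((PySem.List.pyRange 2 n 1).any (fun j => PySem.Int.mod n j == 0)) = !decide (Nat.Prime n.toNat) := by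
  have hn0 : (0 : Int) ≤ n := by omega
  have hcast : ((n.toNat : Int)) = n := Int.toNat_of_nonneg hn0
  by_cases hpr : Nat.Prime n.toNat
  · -- prime: no j in [2,n) divides n
    simp only [hpr, decide_true, Bool.not_true, List.any_eq_false]
    intro j hj
    rw [PySem.List.mem_pyRange_one] at hj
    simp only [beq_iff_eq]
    rw [PySem.Int.mod_eq_zero_iff_dvd]
    intro hdvd
    have hj0 : (0 : Int) ≤ j := by omega
    have hjd : j.toNat ∣ n.toNat := by
      rw [← hcast] at hdvd
      rw [← Int.toNat_of_nonneg hj0] at hdvd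
      exact_mod_cast hdvd
    rcases (Nat.Prime.eq_one_or_self_of_dvd hpr _ hjd) with h1 | h1 <;> omega
  · -- not prime: some j in [2,n) divides n
    simp only [hpr, decide_false, Bool.not_false, List.any_eq_true]
    have hnp := hpr
    rw [Nat.prime_def_lt] at hnp
    push Not at hnp
    obtain ⟨a, ha1, ha2, ha3⟩ := hnp (by omega)
    have ha0 : a ≠ 0 := by
      rintro rfl
      have : n.toNat = 0 := Nat.eq_zero_of_zero_dvd ha2
      omega
    refine ⟨(a : Int), ?_, ?_⟩
    · rw [PySem.List.mem_pyRange_one]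
      constructor
      · exact_mod_cast (by omega : (2:Nat) ≤ a)
      · calc (a : Int) < (n.toNat : Int) := by exact_mod_cast ha1
          _ = n := hcast
    · simp only [beq_iff_eq]
      rw [PySem.Int.mod_eq_zero_iff_dvd]
      rw [← hcast]
      exact_mod_cast ha2

-- B's is_prime is exactly primality for n ≥ 2
lemma isPrimeAlt_eq_prime (n : Int) (hn : 2 ≤ n) :
    isPrimeAlt n = decide (Nat.Prime n.toNat) := by
  have hn0 : (0 : Int) ≤ n := by omega
  have hcast : ((n.toNat : Int)) = n := Int.toNat_of_nonneg hn0
  by_cases h4 : n < 4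
  · interval_cases n <;> decide
  · push Not at h4
    rw [isPrimeAlt, if_neg (by omega)]
    by_cases h2 : PySem.Int.mod n 2 == 0
    · rw [if_pos h2]
      have h2' : (2 : Int) ∣ n := (PySem.Int.mod_eq_zero_iff_dvd n 2).mp (by simpa using h2)
      have h2n : 2 ∣ n.toNat := by
        rw [← hcast] at h2'; exact_mod_cast h2'
      symm
      simp only [decide_eq_false_iff_not]
      intro hpr
      rcases (Nat.Prime.eq_one_or_self_of_dvd hpr _ h2n) with h | h <;> omega
    · rw [if_neg h2]
      have hodd : ¬ (2 ∣ n.toNat) := by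
        intro hd
        have h2dvd : (2 : Int) ∣ n := by rw [← hcast]; exact_mod_cast hd
        have hmod : PySem.Int.mod n 2 = 0 := (PySem.Int.mod_eq_zero_iff_dvd n 2).mpr h2dvd
        exact h2 (by rw [hmod]; rfl)
      by_cases hpr : Nat.Prime n.toNat
      · -- prime: trialOdd finds nothing
        simp only [hpr, decide_true]
        rw [trialOdd_iff]
        intro e he _ hsq hdvd
        have hed : e ∣ n.toNat := by
          rw [← hcast] at hdvd; exact_mod_cast hdvd
        rcases (Nat.Prime.eq_one_or_self_of_dvd hpr _ hed) with h | h
        · omega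
        · subst h
          have he' : ((n.toNat : Int)) = n := hcast
          nlinarith
      · -- not prime, odd, n ≥ 4: there is an odd divisor a with a*a ≤ n, so trialOdd = false
        simp only [hpr, decide_false]
        have hnp := hpr
        rw [Nat.prime_def_le_sqrt] at hnp
        push Not at hnp
        obtain ⟨a, ha2, hasq, hadvd⟩ := hnp (by omega)
        have hasq' : a * a ≤ n.toNat := Nat.le_sqrt.mp hasq
        have haodd : ¬ (2 ∣ a) := fun hd => hodd (dvd_trans hd hadvd)
        have ha3 : 3 ≤ a := by omega
        rw [← Bool.not_eq_true, trialOdd_iff]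
        intro hall
        refine hall a ha3 (by omega) ?_ ?_
        · calc ((a:Int) * (a:Int)) = ((a*a : Nat) : Int) := by push_cast; ring
            _ ≤ ((n.toNat : Int)) := by exact_mod_cast hasq'
            _ = n := hcast
        · rw [← hcast]; exact_mod_cast hadvd

-- per-candidate agreement
lemma gA_eq_isPrimeAlt (n : Int) (hn : 2 ≤ n) : gA n = isPrimeAlt n := by
  by_cases h3 : n > 3
  · rw [gA, if_pos h3, any_iff_not_prime n (by omega), isPrimeAlt_eq_prime n hn]
    simp
  · rw [gA, if_neg h3]
    interval_cases n <;> decide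

-- ===== VERDICT (by name: the statement is the Claim_ definition above) =====
theorem naive_sieve_spec : Claim_equal_naive_sieve := by
  intro m _
  show naive_sieve m = naive_sieve_alt m
  rw [naive_sieve_eq_map, naive_sieve_alt_eq_map]
  apply List.map_congr_left
  intro k hk
  rw [List.mem_range] at hk
  have hm : 1 ≤ m := by omega
  exact gA_eq_isPrimeAlt _ (by omega)
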